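-- pv_equiv track=rewrite | github.com/adiarora/Harmonizer | harmonizer.py | _adjust_to_ranges
-- ===== SOURCE A (Python) =====
-- VOICE_RANGES = {
--     'T1': (60, 79),   # C4 to G5 (Tenor 1 - melody)
--     'T2': (55, 74),   # G3 to D5 (Tenor 2)
--     'Bari': (50, 69), # D3 to A4 (Baritone)
--     'Bass': (40, 62)  # E2 to D4 (Bass)
-- }
--
-- def _adjust_to_ranges(voicing):
--     """Adjust voicing to ensure all notes are in valid ranges."""
--     voices = ['T1', 'T2', 'Bari', 'Bass']
--     adjusted = []
--
--     for i, (pitch, voice) in enumerate(zip(voicing, voices)):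
--         low, high = VOICE_RANGES[voice]
--
--         while pitch < low:
--             pitch += 12
--         while pitch > high:
--             pitch -= 12
--
--         # Final check
--         if pitch < low:
--             pitch = low
--         if pitch > high:
--             pitch = high
--
--         adjusted.append(pitch)
--
--     return adjusted
-- ===== SOURCE B (Python) =====
-- VOICE_RANGES = {
--     'T1': (60, 79),   # C4 to G5 (Tenor 1 - melody)
--     'T2': (55, 74),   # G3 to D5 (Tenor 2)
--     'Bari': (50, 69), # D3 to A4 (Baritone)
--     'Bass': (40, 62)  # E2 to D4 (Bass)
-- }
--
--
-- def _fold_into(pitch, low, high):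
--     """Closed-form octave fold into [low, high] (range spans >= 12 semitones)."""
--     if pitch < low:
--         return low + (pitch - low) % 12
--     if pitch > high:
--         return high - (high - pitch) % 12
--     return pitch
--
--
-- def _adjust_to_ranges(voicing):
--     """Adjust voicing to ensure all notes are in valid ranges."""
--     return [_fold_into(p, *VOICE_RANGES[v])
--             for p, v in zip(voicing, ['T1', 'T2', 'Bari', 'Bass'])]
-- ===== Notes on version B (the rewrite author's own statement) =====
-- stated objective: simpler
-- what changed: Replaces the two per-note while loops and the dead final clamp with a single closed-form octave fold (one modulo per out-of-range note) inside a list comprehension.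
import Mathlib
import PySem

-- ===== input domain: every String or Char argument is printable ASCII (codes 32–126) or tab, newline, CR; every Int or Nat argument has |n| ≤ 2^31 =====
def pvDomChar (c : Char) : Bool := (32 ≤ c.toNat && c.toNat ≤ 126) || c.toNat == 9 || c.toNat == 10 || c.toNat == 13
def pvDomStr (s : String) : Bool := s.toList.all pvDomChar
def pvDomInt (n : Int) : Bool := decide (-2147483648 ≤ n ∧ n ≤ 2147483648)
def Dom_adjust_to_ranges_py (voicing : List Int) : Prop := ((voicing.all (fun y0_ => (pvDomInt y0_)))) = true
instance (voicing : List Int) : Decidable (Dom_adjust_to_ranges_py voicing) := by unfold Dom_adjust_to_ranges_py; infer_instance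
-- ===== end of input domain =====

-- B replaces A's per-note while loops (and dead final clamp) with one closed-form modulo fold per note: simpler.

-- ===== PORT A =====
def pvVoiceRanges : PySem.Dict String (Int × Int) :=
  PySem.Dict.ofList [("T1", (60, 79)), ("T2", (55, 74)), ("Bari", (50, 69)), ("Bass", (40, 62))]

-- 'while pitch < low: pitch += 12'
def pvWhileUp (low pitch : Int) : Int :=
  if pitch < low then pvWhileUp low (pitch + 12) else pitch
termination_by (low - pitch).toNat
decreasing_by omega

-- 'while pitch > high: pitch -= 12'
def pvWhileDown (high pitch : Int) : Int :=
  if pitch > high then pvWhileDown high (pitch - 12) else pitch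
termination_by (pitch - high).toNat
decreasing_by omega

-- the body of A's for loop for one (pitch, voice) pair, statement by statement
def pvStepA (pitch low high : Int) : Int :=
  let pitch := pvWhileUp low pitch
  let pitch := pvWhileDown high pitch
  let pitch := if pitch < low then low else pitch
  let pitch := if pitch > high then high else pitch
  pitch

def adjust_to_ranges_py (voicing : List Int) : List Int :=
  let voices := ["T1", "T2", "Bari", "Bass"]
  (PySem.List.enumerate (voicing.zip voices)).foldl
    (fun adjusted iv =>
      let pitch := iv.2.1
      let voice := iv.2.2
      let lh := (pvVoiceRanges.get? voice).getD (0, 0)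
      adjusted ++ [pvStepA pitch lh.1 lh.2])
    []

-- ===== PORT B =====
def pvFoldInto (pitch low high : Int) : Int :=
  if pitch < low then low + PySem.Int.mod (pitch - low) 12
  else if pitch > high then high - PySem.Int.mod (high - pitch) 12
  else pitch

def adjust_to_ranges_py_alt (voicing : List Int) : List Int :=
  (voicing.zip ["T1", "T2", "Bari", "Bass"]).map
    (fun pv =>
      let lh := (pvVoiceRanges.get? pv.2).getD (0, 0)
      pvFoldInto pv.1 lh.1 lh.2)

-- ===== PRECONDITION & SPEC =====
def Spec_adjust_to_ranges_py (voicing : List Int) (out : List Int) : Prop := out = adjust_to_ranges_py_alt voicing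
instance (voicing : List Int) (out : List Int) : Decidable (Spec_adjust_to_ranges_py voicing out) := by unfold Spec_adjust_to_ranges_py; infer_instance

-- ===== CLAIM (what is proved, stated in full; the proofs are below) =====
def Claim_equal_adjust_to_ranges_py : Prop := ∀ (voicing : List Int), Dom_adjust_to_ranges_py voicing → Spec_adjust_to_ranges_py voicing (adjust_to_ranges_py voicing)

-- ===== LEMMAS AND PROOFS =====
theorem pvWhileUp_eq (low pitch : Int) :
    pvWhileUp low pitch = if pitch < low then low + (pitch - low) % 12 else pitch := by
  fun_induction pvWhileUp low pitch with
  | case1 pitch h ih => rw [ih]; split_ifs <;> omega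
  | case2 pitch h => simp [h]

theorem pvWhileDown_eq (high pitch : Int) :
    pvWhileDown high pitch = if pitch > high then high - (high - pitch) % 12 else pitch := by
  fun_induction pvWhileDown high pitch with
  | case1 pitch h ih => rw [ih]; split_ifs <;> omega
  | case2 pitch h => simp [h]

theorem pvMod12 (a : Int) : PySem.Int.mod a 12 = a % 12 :=
  PySem.Int.mod_eq_emod_of_pos (by norm_num : (0:Int) < 12)

theorem pvStepA_eq (pitch low high : Int) (h : low + 11 ≤ high) :
    pvStepA pitch low high = pvFoldInto pitch low high := by
  simp only [pvStepA, pvFoldInto, pvWhileUp_eq, pvWhileDown_eq, pvMod12]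
  split_ifs <;> omega

theorem pvGet_T1 : pvVoiceRanges.get? "T1" = some ((60 : Int), (79 : Int)) := by decide
theorem pvGet_T2 : pvVoiceRanges.get? "T2" = some ((55 : Int), (74 : Int)) := by decide
theorem pvGet_Bari : pvVoiceRanges.get? "Bari" = some ((50 : Int), (69 : Int)) := by decide
theorem pvGet_Bass : pvVoiceRanges.get? "Bass" = some ((40 : Int), (62 : Int)) := by decide

theorem pvStep_T1 (p : Int) : pvStepA p 60 79 = pvFoldInto p 60 79 := pvStepA_eq p 60 79 (by norm_num)
theorem pvStep_T2 (p : Int) : pvStepA p 55 74 = pvFoldInto p 55 74 := pvStepA_eq p 55 74 (by norm_num)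
theorem pvStep_Bari (p : Int) : pvStepA p 50 69 = pvFoldInto p 50 69 := pvStepA_eq p 50 69 (by norm_num)
theorem pvStep_Bass (p : Int) : pvStepA p 40 62 = pvFoldInto p 40 62 := pvStepA_eq p 40 62 (by norm_num)

theorem adjust_to_ranges_py_spec : Claim_equal_adjust_to_ranges_py := by
  intro voicing _
  unfold Spec_adjust_to_ranges_py
  rcases voicing with _ | ⟨a, _ | ⟨b, _ | ⟨c, _ | ⟨d, rest⟩⟩⟩⟩ <;>
    simp [adjust_to_ranges_py, adjust_to_ranges_py_alt, PySem.List.enumerate, PySem.List.enumerate_cons, pvGet_T1, pvGet_T2, pvGet_Bari, pvGet_Bass,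
          pvStep_T1, pvStep_T2, pvStep_Bari, pvStep_Bass]
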